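-- pv_equiv track=rewrite | github.com/Gghosh55/DSA_Assignment16 | Stack1.py | find_nearest_greater_frequency
-- ===== SOURCE A (Python) =====
-- from collections import Counter
--
-- def find_nearest_greater_frequency(arr):
--     frequency = Counter(arr)
--     n = len(arr)
--     answers = []
--
--     for i in range(n):
--         current = arr[i]
--         answer = -1
--
--         for j in range(i + 1, n):
--             if frequency[arr[j]] > frequency[current]:
--                 answer = arr[j]
--                 break
--
--         answers.append(answer)
--
--     return answers
-- ===== SOURCE B (Python) =====
-- from collections import Counter
--
-- def find_nearest_greater_frequency(arr):
--     freq = Counter(arr)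
--     res = []
--     stack = []
--     for x in reversed(arr):
--         f = freq[x]
--         while stack and freq[stack[-1]] <= f:
--             stack.pop()
--         res.append(stack[-1] if stack else -1)
--         stack.append(x)
--     res.reverse()
--     return res
-- ===== Notes on version B (the rewrite author's own statement) =====
-- stated objective: faster
-- what changed: Replaced the per-index forward rescan with a single right-to-left pass maintaining a monotonic stack of frequencies (next-greater-element style).
import Mathlib
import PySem

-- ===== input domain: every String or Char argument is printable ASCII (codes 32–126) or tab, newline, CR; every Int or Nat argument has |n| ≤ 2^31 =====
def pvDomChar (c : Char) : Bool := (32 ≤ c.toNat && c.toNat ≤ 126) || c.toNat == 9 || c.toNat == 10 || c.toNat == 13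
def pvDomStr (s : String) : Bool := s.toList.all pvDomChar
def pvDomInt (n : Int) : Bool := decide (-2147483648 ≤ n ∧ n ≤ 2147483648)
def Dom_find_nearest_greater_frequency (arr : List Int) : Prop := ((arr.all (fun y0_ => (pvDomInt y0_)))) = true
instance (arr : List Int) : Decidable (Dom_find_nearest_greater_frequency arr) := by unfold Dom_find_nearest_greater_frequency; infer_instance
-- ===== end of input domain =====

-- B replaces A's quadratic per-index forward rescan by one right-to-left monotonic-stack pass (objective: faster).

-- ===== PORT A =====
-- inner loop 'for j in range(i+1, n): if frequency[arr[j]] > frequency[current]: answer = arr[j]; break'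
-- (answer starts at -1; Counter lookup = getD 0)
def pvInnerA (frequency : PySem.Dict Int Int) (arr : List Int) (current : Int) : List Int → Int
  | [] => -1
  | j :: js =>
      let aj := (PySem.List.pyGet? arr j).getD 0   -- arr[j]; j always in range here
      if frequency.getD aj 0 > frequency.getD current 0 then aj
      else pvInnerA frequency arr current js

def find_nearest_greater_frequency (arr : List Int) : List Int :=
  let frequency := PySem.Dict.counter arr
  let n : Int := arr.length
  (PySem.List.pyRange 0 n 1).foldl (fun answers i =>
    let current := (PySem.List.pyGet? arr i).getD 0   -- arr[i]; i always in range here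
    let answer := pvInnerA frequency arr current (PySem.List.pyRange (i + 1) n 1)
    answers ++ [answer]) []

-- ===== PORT B =====
-- 'while stack and freq[stack[-1]] <= f: stack.pop()'  (the stack's top = list head here)
def pvPopB (freq : PySem.Dict Int Int) (f : Int) : List Int → List Int
  | [] => []
  | t :: rest => if freq.getD t 0 ≤ f then pvPopB freq f rest else t :: rest

-- loop body of 'for x in reversed(arr)': state = (res, stack)
def pvStepB (freq : PySem.Dict Int Int) (st : List Int × List Int) (x : Int) : List Int × List Int :=
  let f := freq.getD x 0
  let stack := pvPopB freq f st.2
  (st.1 ++ [match stack with | [] => -1 | t :: _ => t], x :: stack)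

def find_nearest_greater_frequency_alt (arr : List Int) : List Int :=
  let freq := PySem.Dict.counter arr
  let res := (arr.reverse.foldl (pvStepB freq) ([], [])).1
  res.reverse

-- ===== PRECONDITION & SPEC =====
def Spec_find_nearest_greater_frequency (arr : List Int) (out : List Int) : Prop := out = find_nearest_greater_frequency_alt arr
instance (arr : List Int) (out : List Int) : Decidable (Spec_find_nearest_greater_frequency arr out) := by unfold Spec_find_nearest_greater_frequency; infer_instance

-- ===== CLAIM (what is proved, stated in full; the proofs are below) =====
def Claim_equal_find_nearest_greater_frequency : Prop := ∀ (arr : List Int), Dom_find_nearest_greater_frequency arr → Spec_find_nearest_greater_frequency arr (find_nearest_greater_frequency arr)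

-- ===== LEMMAS AND PROOFS =====

-- common specification: per element, the first later element with strictly greater frequency, else -1
def pvSpec (freq : PySem.Dict Int Int) : List Int → List Int
  | [] => []
  | x :: s => ((s.find? (fun y => decide (freq.getD x 0 < freq.getD y 0))).getD (-1)) :: pvSpec freq s

-- the stack B holds after processing a suffix (top first)
def pvStackOf (freq : PySem.Dict Int Int) : List Int → List Int
  | [] => []
  | x :: s => x :: pvPopB freq (freq.getD x 0) (pvStackOf freq s)

-- popping elements of frequency ≤ fx ≤ c removes no candidate with frequency > c
theorem pvPop_find (freq : PySem.Dict Int Int) (fx c : Int) (h : fx ≤ c) (t : List Int) :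
    (pvPopB freq fx t).find? (fun y => decide (c < freq.getD y 0))
      = t.find? (fun y => decide (c < freq.getD y 0)) := by
  induction t with
  | nil => rfl
  | cons t0 rest ih =>
    by_cases ht : freq.getD t0 0 ≤ fx
    · simp [pvPopB, ht, ih, show ¬ c < freq.getD t0 0 by omega]
    · simp [pvPopB, ht]

-- after popping, the stack top is the first stack element with greater frequency
theorem pvPop_head (freq : PySem.Dict Int Int) (fx : Int) (t : List Int) :
    (pvPopB freq fx t).head? = t.find? (fun y => decide (fx < freq.getD y 0)) := by
  induction t with
  | nil => rfl
  | cons t0 rest ih =>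
    by_cases ht : freq.getD t0 0 ≤ fx
    · simp [pvPopB, ht, ih, show ¬ fx < freq.getD t0 0 by omega]
    · simp [pvPopB, ht, show fx < freq.getD t0 0 by omega]

-- searching the stack = searching the suffix it summarises
theorem pvStack_find (freq : PySem.Dict Int Int) (c : Int) (s : List Int) :
    (pvStackOf freq s).find? (fun y => decide (c < freq.getD y 0))
      = s.find? (fun y => decide (c < freq.getD y 0)) := by
  induction s with
  | nil => rfl
  | cons x s ih =>
    by_cases hx : c < freq.getD x 0
    · simp [pvStackOf, hx]
    · simp only [pvStackOf, List.find?_cons]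
      simp only [hx, decide_false]
      rw [pvPop_find freq _ c (by omega), ih]

-- B's fold over the reversed list computes (reversed spec, stack)
theorem pvFoldB (freq : PySem.Dict Int Int) (arr : List Int) :
    arr.reverse.foldl (pvStepB freq) ([], []) = ((pvSpec freq arr).reverse, pvStackOf freq arr) := by
  induction arr with
  | nil => rfl
  | cons x s ih =>
    rw [List.reverse_cons, List.foldl_append, ih]
    simp only [List.foldl_cons, List.foldl_nil, pvStepB, pvSpec, pvStackOf, List.reverse_cons]
    congr 2
    rw [show (match pvPopB freq (freq.getD x 0) (pvStackOf freq s) with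
          | [] => (-1 : Int) | t :: _ => t)
        = ((pvPopB freq (freq.getD x 0) (pvStackOf freq s)).head?).getD (-1) by
      cases pvPopB freq (freq.getD x 0) (pvStackOf freq s) <;> rfl]
    rw [pvPop_head, pvStack_find]

-- A's inner scan over range(m, n) = find? over the suffix arr[m:]
theorem pvInner_eq (freq : PySem.Dict Int Int) (arr : List Int) (c : Int) :
    ∀ (k m : Nat), arr.length - m = k →
    pvInnerA freq arr c (PySem.List.pyRange (m : Int) (arr.length : Int) 1)
      = ((arr.drop m).find? (fun y => decide (freq.getD c 0 < freq.getD y 0))).getD (-1) := by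
  intro k
  induction k with
  | zero =>
    intro m hm
    have hle : arr.length ≤ m := by omega
    have : PySem.List.pyRange (m : Int) (arr.length : Int) 1 = [] := by
      rw [PySem.List.pyRange_one]
      have : ((arr.length : Int) - m).toNat = 0 := by omega
      simp [this]
    rw [this, List.drop_eq_nil_of_le hle]
    rfl
  | succ k ih =>
    intro m hm
    have hlt : m < arr.length := by omega
    rw [PySem.List.pyRange_one_cons (by exact_mod_cast hlt)]
    have hget : (PySem.List.pyGet? arr (m : Int)).getD 0 = arr[m] := by
      rw [PySem.List.pyGet?_natCast, List.getElem?_eq_getElem hlt]; rfl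
    have hdrop : arr.drop m = arr[m] :: arr.drop (m + 1) := List.drop_eq_getElem_cons hlt
    rw [hdrop]
    show (if freq.getD ((PySem.List.pyGet? arr (m : Int)).getD 0) 0 > freq.getD c 0
          then (PySem.List.pyGet? arr (m : Int)).getD 0
          else pvInnerA freq arr c (PySem.List.pyRange ((m : Int) + 1) (arr.length : Int) 1)) = _
    rw [hget]
    by_cases hc : freq.getD c 0 < freq.getD arr[m] 0
    · simp only [gt_iff_lt, hc, if_true, List.find?_cons, decide_true]
      simp
    · simp only [gt_iff_lt, hc, if_false, List.find?_cons, decide_false]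
      have hcast : ((m : Int) + 1) = ((m + 1 : Nat) : Int) := by push_cast; ring
      rw [hcast, ih (m + 1) (by omega)]

-- the index-wise description of A's answers = the suffix recursion pvSpec
theorem pvMapRange (freq : PySem.Dict Int Int) (l : List Int) :
    (List.range l.length).map (fun k =>
      ((l.drop (k+1)).find? (fun y => decide (freq.getD (l.getD k 0) 0 < freq.getD y 0))).getD (-1))
      = pvSpec freq l := by
  induction l with
  | nil => rfl
  | cons x s ih =>
    rw [List.length_cons, List.range_succ_eq_map, List.map_cons, List.map_map]
    simp only [pvSpec]
    congr 1

theorem pvB_eq_spec (arr : List Int) :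
    find_nearest_greater_frequency_alt arr = pvSpec (PySem.Dict.counter arr) arr := by
  show ((arr.reverse.foldl (pvStepB (PySem.Dict.counter arr)) ([], [])).1).reverse = _
  rw [pvFoldB]
  exact List.reverse_reverse _

theorem pvA_eq_spec (arr : List Int) :
    find_nearest_greater_frequency arr = pvSpec (PySem.Dict.counter arr) arr := by
  unfold find_nearest_greater_frequency
  show (PySem.List.pyRange 0 (arr.length : Int) 1).foldl
      (fun answers i => answers ++ [pvInnerA (PySem.Dict.counter arr) arr
        ((PySem.List.pyGet? arr i).getD 0) (PySem.List.pyRange (i + 1) (arr.length : Int) 1)]) []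
      = _
  rw [PySem.List.foldl_append_singleton_eq_map, PySem.List.pyRange_one, List.map_map]
  have hlen : (((arr.length : Int)) - 0).toNat = arr.length := by omega
  rw [hlen, ← pvMapRange (PySem.Dict.counter arr) arr]
  apply List.map_congr_left
  intro k hk
  have hk' : k < arr.length := List.mem_range.mp hk
  simp only [Function.comp_apply, zero_add]
  have h1 : (PySem.List.pyGet? arr (k : Int)).getD 0 = arr.getD k 0 := by
    rw [PySem.List.pyGet?_natCast]; rfl
  have h2 : ((k : Int) + 1) = ((k + 1 : Nat) : Int) := by push_cast; ring
  rw [h1, h2, pvInner_eq (PySem.Dict.counter arr) arr _ (arr.length - (k+1)) (k+1) rfl]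

-- ===== VERDICT (by name: the statement is the Claim_ definition above) =====
theorem find_nearest_greater_frequency_spec : Claim_equal_find_nearest_greater_frequency := by
  intro arr _
  unfold Spec_find_nearest_greater_frequency
  rw [pvA_eq_spec, pvB_eq_spec]
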